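-- pv_equiv track=rewrite | github.com/scoopgracie/phenny | modules/queue.py | disambiguate_name
-- ===== SOURCE A (Python) =====
-- def disambiguate_name(queue_data, queue_name):
--     matches = []
--
--     for i in queue_data:
--         if queue_name == i:
--             return i
--
--         if queue_name.casefold() in i.casefold():
--             matches.append(i)
--
--     return matches
-- ===== SOURCE B (Python) =====
-- def disambiguate_name(queue_data, queue_name):
--     if queue_name in queue_data:
--         return queue_data[queue_data.index(queue_name)]
--     cf = queue_name.casefold()
--     return [i for i in queue_data if cf in i.casefold()]
-- ===== Notes on version B (the rewrite author's own statement) =====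
-- stated objective: faster
-- what changed: Replaces the single interleaved loop with an accumulator by a C-level membership test for the exact match followed by a filter comprehension for the substring matches.
-- outside the precondition, e.g. on disambiguate_name(['a', 'b'], 'a'): A returns 'a', B returns 'a'
import Mathlib
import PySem

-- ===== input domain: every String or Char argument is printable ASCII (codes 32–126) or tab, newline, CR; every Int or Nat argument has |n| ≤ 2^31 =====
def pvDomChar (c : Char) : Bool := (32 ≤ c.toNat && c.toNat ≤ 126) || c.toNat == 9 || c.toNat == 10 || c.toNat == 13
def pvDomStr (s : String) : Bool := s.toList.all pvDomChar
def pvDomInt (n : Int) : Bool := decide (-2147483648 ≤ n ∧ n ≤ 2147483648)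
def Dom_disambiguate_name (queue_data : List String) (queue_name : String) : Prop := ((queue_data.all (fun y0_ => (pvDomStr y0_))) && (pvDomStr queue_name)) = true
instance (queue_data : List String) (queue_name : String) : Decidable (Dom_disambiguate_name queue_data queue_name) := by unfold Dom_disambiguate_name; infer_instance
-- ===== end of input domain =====

-- B replaces A's single interleaved loop by an exact-membership test plus a filter (measured faster in a timing run: C-level built-ins replace the interpreted loop).
-- str.casefold is ported as PySem.Str.lower, exact on the ASCII domain Dom_ guarantees.

-- ===== PORT A =====
-- A's for-loop with early return and a 'macc' accumulator.  On an exact match Python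
-- returns the bare string i (not a list) — that leaves the declared return type and is
-- excluded by Pre_; the port wraps it as [i] there (never reached inside Pre_).
def disambiguate_name_loop (queue_name : String) : List String → List String → List String
  | [], macc => macc
  | i :: rest, macc =>
    if queue_name == i then [i]
    else if PySem.Str.isIn (PySem.Str.lower queue_name) (PySem.Str.lower i) then
      disambiguate_name_loop queue_name rest (macc ++ [i])
    else
      disambiguate_name_loop queue_name rest macc

def disambiguate_name (queue_data : List String) (queue_name : String) : List String :=
  disambiguate_name_loop queue_name queue_data []

-- ===== PORT B =====
-- B: membership test for the exact match (Python returns the found element, equal to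
-- queue_name; the bare-string return is outside Pre_), else a filter comprehension.
def disambiguate_name_alt (queue_data : List String) (queue_name : String) : List String :=
  if queue_name ∈ queue_data then [queue_name]
  else queue_data.filter (fun i => PySem.Str.isIn (PySem.Str.lower queue_name) (PySem.Str.lower i))

-- ===== PRECONDITION & SPEC =====
-- Pre_ excludes inputs where queue_name occurs in queue_data: there Python A (and B)
-- return a bare string, not a list, so the result is not a value of the declared type List String.
def Pre_disambiguate_name (queue_data : List String) (queue_name : String) : Prop :=
  queue_name ∉ queue_data
instance (queue_data : List String) (queue_name : String) : Decidable (Pre_disambiguate_name queue_data queue_name) := by unfold Pre_disambiguate_name; infer_instance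

def pvWitness_disambiguate_name : List String × String := (["apple", "Banana"], "an")

def Spec_disambiguate_name (queue_data : List String) (queue_name : String) (out : List String) : Prop := out = disambiguate_name_alt queue_data queue_name
instance (queue_data : List String) (queue_name : String) (out : List String) : Decidable (Spec_disambiguate_name queue_data queue_name out) := by unfold Spec_disambiguate_name; infer_instance

-- ===== CLAIM (what is proved, stated in full; the proofs are below) =====
def Claim_equal_disambiguate_name : Prop := ∀ (queue_data : List String) (queue_name : String), Dom_disambiguate_name queue_data queue_name → Pre_disambiguate_name queue_data queue_name → Spec_disambiguate_name queue_data queue_name (disambiguate_name queue_data queue_name)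

-- ===== LEMMAS AND PROOFS =====
theorem disambiguate_name_loop_eq (queue_name : String) (l acc : List String)
    (h : queue_name ∉ l) :
    disambiguate_name_loop queue_name l acc =
      acc ++ l.filter (fun i => PySem.Str.isIn (PySem.Str.lower queue_name) (PySem.Str.lower i)) := by
  induction l generalizing acc with
  | nil => simp [disambiguate_name_loop]
  | cons i rest ih =>
    have hne : queue_name ≠ i := fun he => h (he ▸ List.mem_cons_self ..)
    have hrest : queue_name ∉ rest := fun hm => h (List.mem_cons_of_mem _ hm)
    simp only [disambiguate_name_loop, if_neg (show ¬(queue_name == i) = true by simpa using hne),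
      List.filter_cons]
    split_ifs with hc
    · rw [ih _ hrest, List.append_assoc]; rfl
    · exact ih _ hrest

-- ===== VERDICT (by name: the statement is the Claim_ definition above) =====
theorem disambiguate_name_spec : Claim_equal_disambiguate_name := by
  intro queue_data queue_name _ hpre
  unfold Spec_disambiguate_name disambiguate_name disambiguate_name_alt
  rw [if_neg hpre, disambiguate_name_loop_eq _ _ _ hpre]
  simp
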